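-- pv_equiv track=rewrite | github.com/suolegoudachongfeng/Evo-RL | src/lerobot/scripts/lerobot_export_boundary_frames.py | _format_episode_spec
-- ===== SOURCE A (Python) =====
-- def _format_episode_spec(episode_indices: list[int]) -> str:
--     if not episode_indices:
--         return ""
--     groups: list[str] = []
--     start = episode_indices[0]
--     prev = start
--     for idx in episode_indices[1:]:
--         if idx == prev + 1:
--             prev = idx
--         else:
--             groups.append(str(start) if start == prev else f"{start}-{prev}")
--             start = idx
--             prev = idx
--     groups.append(str(start) if start == prev else f"{start}-{prev}")
--     return ",".join(groups)
-- ===== SOURCE B (Python) =====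
-- def _format_episode_spec(episode_indices: list[int]) -> str:
--     if not episode_indices:
--         return ""
--     n = len(episode_indices)
--     # staged passes: (1) find the cut positions where a new run starts, (2) format each [lo, hi) segment
--     cuts = [0] + [i for i in range(1, n) if episode_indices[i] != episode_indices[i - 1] + 1] + [n]
--     pieces: list[str] = []
--     for lo, hi in zip(cuts, cuts[1:]):
--         a = episode_indices[lo]
--         b = episode_indices[hi - 1]
--         pieces.append(str(a) if a == b else f"{a}-{b}")
--     return ",".join(pieces)
-- ===== Notes on version B (the rewrite author's own statement) =====
-- stated objective: alternative
-- what changed: Replaces the single forward pass with start/prev accumulators by staged passes: a comprehension over indices computes the cut positions where a new run starts, and a separate pass over zipped adjacent cut pairs formats each [lo,hi) segment by indexing into the list.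
import Mathlib
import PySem

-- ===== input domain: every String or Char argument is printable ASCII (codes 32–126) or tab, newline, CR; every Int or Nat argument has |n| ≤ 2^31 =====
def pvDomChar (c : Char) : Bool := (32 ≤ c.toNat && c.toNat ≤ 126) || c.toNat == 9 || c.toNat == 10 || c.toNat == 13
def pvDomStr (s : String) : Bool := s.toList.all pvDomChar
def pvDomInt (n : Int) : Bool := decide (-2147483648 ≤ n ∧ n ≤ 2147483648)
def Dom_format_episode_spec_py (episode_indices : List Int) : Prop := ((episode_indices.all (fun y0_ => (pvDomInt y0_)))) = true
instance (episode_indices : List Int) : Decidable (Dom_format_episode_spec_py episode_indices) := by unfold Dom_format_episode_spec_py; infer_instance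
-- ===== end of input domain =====

-- B replaces A's single forward start/prev pointer loop by staged passes: first a comprehension
-- over indices computing the cut positions where a new run starts, then a formatting pass over
-- zipped adjacent cut pairs (objective: alternative decomposition, same O(n) cost).

-- ===== PORT A =====
-- str(start) if start == prev else f"{start}-{prev}"  (shared by both Pythons verbatim)
def pvFmt (s p : Int) : String :=
  if s = p then PySem.Int.toStr s else PySem.Int.toStr s ++ "-" ++ PySem.Int.toStr p

-- the body of A's for-loop; state = (groups, start, prev)
def pvStepA (st : List String × Int × Int) (idx : Int) : List String × Int × Int :=
  if idx = st.2.2 + 1 then (st.1, st.2.1, idx)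
  else (st.1 ++ [pvFmt st.2.1 st.2.2], idx, idx)

-- the trailing groups.append after the loop
def pvFinish (st : List String × Int × Int) : List String := st.1 ++ [pvFmt st.2.1 st.2.2]

def format_episode_spec_py (episode_indices : List Int) : String :=
  match episode_indices with
  | [] => ""
  | x :: _ =>
    PySem.Str.join ","
      (pvFinish ((PySem.List.slice episode_indices (some 1) none).foldl pvStepA ([], x, x)))

-- ===== PORT B =====
-- cuts = [0] + [i for i in range(1, n) if xs[i] != xs[i-1] + 1] + [n]
def pvCuts (xs : List Int) : List Int :=
  [0] ++
    (PySem.List.pyRange 1 (xs.length : Int) 1).filter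
      (fun i => !(PySem.List.pyGetD xs i 0 == PySem.List.pyGetD xs (i - 1) 0 + 1)) ++
    [(xs.length : Int)]

def format_episode_spec_py_alt (episode_indices : List Int) : String :=
  match episode_indices with
  | [] => ""
  | _ :: _ =>
    let cuts := pvCuts episode_indices
    -- for lo, hi in zip(cuts, cuts[1:]): pieces.append(str(a) if a == b else f"{a}-{b}")
    let pieces := (cuts.zip (PySem.List.slice cuts (some 1) none)).map
      (fun lh => pvFmt (PySem.List.pyGetD episode_indices lh.1 0)
                       (PySem.List.pyGetD episode_indices (lh.2 - 1) 0))
    PySem.Str.join "," pieces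

-- ===== PRECONDITION & SPEC =====
def Spec_format_episode_spec_py (episode_indices : List Int) (out : String) : Prop := out = format_episode_spec_py_alt episode_indices
instance (episode_indices : List Int) (out : String) : Decidable (Spec_format_episode_spec_py episode_indices out) := by unfold Spec_format_episode_spec_py; infer_instance

-- ===== CLAIM (what is proved, stated in full; the proofs are below) =====
def Claim_equal_format_episode_spec_py : Prop := ∀ (episode_indices : List Int), Dom_format_episode_spec_py episode_indices → Spec_format_episode_spec_py episode_indices (format_episode_spec_py episode_indices)

-- ===== LEMMAS AND PROOFS =====

-- the (start, end) value pairs of the maximal consecutive runs, as A discovers them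
def pvPairs (s p : Int) : List Int → List (Int × Int)
  | [] => [(s, p)]
  | x :: xs => if x = p + 1 then pvPairs s x xs else (s, p) :: pvPairs x x xs

theorem pvFoldA (xs : List Int) : ∀ (g : List String) (s p : Int),
    pvFinish (xs.foldl pvStepA (g, s, p)) = g ++ (pvPairs s p xs).map (fun ab => pvFmt ab.1 ab.2) := by
  induction xs with
  | nil => intro g s p; simp [pvFinish, pvPairs]
  | cons x xs ih =>
    intro g s p
    by_cases h : x = p + 1
    · simp [pvPairs, pvStepA, h, ih]
    · simp [pvPairs, pvStepA, h, ih]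

-- replace the first run's start value
def pvSetFirst (s : Int) : List (Int × Int) → List (Int × Int)
  | [] => []
  | ab :: t => (s, ab.2) :: t

theorem pvSetFirst_setFirst (s p : Int) (l : List (Int × Int)) :
    pvSetFirst s (pvSetFirst p l) = pvSetFirst s l := by cases l <;> rfl

theorem pairs_setFirst : ∀ (xs : List Int) (s p : Int),
    pvPairs s p xs = pvSetFirst s (pvPairs p p xs) := by
  intro xs
  induction xs with
  | nil => intro s p; rfl
  | cons x xs ih =>
    intro s p
    by_cases h : x = p + 1
    · simp only [pvPairs, if_pos h]
      rw [ih s x, ih p x, pvSetFirst_setFirst]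
    · simp [pvPairs, h, pvSetFirst]

-- xs[i+1] = (x::xs)[i] for nonnegative i (pyGetD, default-totalized)
theorem pyGetD_cons_shift (a : Int) (l : List Int) (i : Int) (hi : 0 ≤ i) (d : Int) :
    PySem.List.pyGetD (a :: l) (i + 1) d = PySem.List.pyGetD l i d := by
  have h1 : i = ((i.toNat : Nat) : Int) := by omega
  rw [h1, show ((i.toNat : Int) + 1) = ((i.toNat + 1 : Nat) : Int) by push_cast; ring,
    PySem.List.pyGetD_natCast, PySem.List.pyGetD_natCast]
  rfl

-- the filtered comprehension inside pvCuts, on its own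
def pvBreaks (xs : List Int) : List Int :=
  (PySem.List.pyRange 1 (xs.length : Int) 1).filter
    (fun i => !(PySem.List.pyGetD xs i 0 == PySem.List.pyGetD xs (i - 1) 0 + 1))

theorem pvCuts_eq (xs : List Int) : pvCuts xs = 0 :: (pvBreaks xs ++ [(xs.length : Int)]) := by
  simp [pvCuts, pvBreaks]

theorem breaks_pos (xs : List Int) : ∀ i ∈ pvBreaks xs, 1 ≤ i := by
  intro i hi
  have := List.mem_of_mem_filter hi
  exact (PySem.List.mem_pyRange_one.mp this).1

theorem breaks_single (x : Int) : pvBreaks [x] = [] := by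
  simp [pvBreaks, PySem.List.pyRange_one_eq_nil]

theorem breaks_cons (x y : Int) (zs : List Int) :
    pvBreaks (x :: y :: zs) =
      (if y = x + 1 then [] else [1]) ++ (pvBreaks (y :: zs)).map (· + 1) := by
  unfold pvBreaks
  rw [show ((x::y::zs).length : Int) = ((zs.length + 2 : Nat) : Int) by simp only [List.length_cons],
      show (((y::zs)).length : Int) = ((zs.length + 1 : Nat) : Int) by simp only [List.length_cons],
      PySem.List.pyRange_one, PySem.List.pyRange_one,
      show ((((zs.length + 2 : Nat) : Int)) - 1).toNat = zs.length + 1 by omega,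
      show ((((zs.length + 1 : Nat) : Int)) - 1).toNat = zs.length by omega,
      List.range_succ_eq_map]
  simp only [List.map_cons, List.map_map, List.filter_cons, List.filter_map]
  rw [show (1:Int) + ((0:Nat):Int) = 0 + 1 by simp,
      pyGetD_cons_shift x (y::zs) 0 le_rfl, show (0:Int) + 1 - 1 = 0 by ring,
      PySem.List.pyGetD_zero_cons, PySem.List.pyGetD_zero_cons]
  have hfilt : ((fun i => !(PySem.List.pyGetD (x::y::zs) i 0 == PySem.List.pyGetD (x::y::zs) (i-1) 0 + 1)) ∘ (fun k : Nat => (1:Int)+↑k) ∘ Nat.succ)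
      = ((fun i => !(PySem.List.pyGetD (y::zs) i 0 == PySem.List.pyGetD (y::zs) (i-1) 0 + 1)) ∘ (fun k : Nat => (1:Int)+↑k)) := by
    funext k
    simp only [Function.comp_apply, Nat.succ_eq_add_one]
    rw [show (1:Int) + ((k+1:Nat):Int) = ((1:Int)+↑k) + 1 by push_cast; ring,
        pyGetD_cons_shift x (y::zs) (1+↑k) (by positivity),
        show ((1:Int)+↑k) + 1 - 1 = (↑k:Int) + 1 by ring,
        pyGetD_cons_shift x (y::zs) (↑k) (by positivity),
        show (1:Int) + ↑k - 1 = (↑k:Int) by ring]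
  have hmap : ((fun k : Nat => (1:Int) + ↑k) ∘ Nat.succ) = ((fun v : Int => v + 1) ∘ fun k : Nat => (1:Int) + ↑k) := by
    funext k; simp only [Function.comp_apply, Nat.succ_eq_add_one]; push_cast; ring
  rw [hfilt, hmap]
  by_cases h : y = x + 1
  · simp [h]
  · simp [h]

-- the (start, end) value pair a cut pair (lo, hi) denotes
def pvPc (xs : List Int) (p : Int × Int) : Int × Int :=
  (PySem.List.pyGetD xs p.1 0, PySem.List.pyGetD xs (p.2 - 1) 0)

def pvBp (xs : List Int) : List (Int × Int) :=
  ((pvCuts xs).zip (pvCuts xs).tail).map (pvPc xs)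

-- shifting the cut list by one and the indexed list by one cons cancels
theorem bp_shift : ∀ (l : List Int) (y : Int) (ys : List Int),
    (∀ i ∈ l, 0 ≤ i) → (∀ i ∈ l.tail, 1 ≤ i) →
    ((l.map (· + 1)).zip (l.map (· + 1)).tail).map (pvPc (y :: ys)) =
      (l.zip l.tail).map (pvPc ys) := by
  intro l
  induction l with
  | nil => intro y ys _ _; rfl
  | cons a t ih =>
    intro y ys h0 h1
    cases t with
    | nil => rfl
    | cons b u =>
      have hb : 1 ≤ b := h1 b (by simp)
      have ha : 0 ≤ a := h0 a (by simp)
      simp only [List.map_cons, List.tail_cons, List.zip_cons_cons]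
      congr 1
      · show pvPc (y :: ys) (a + 1, b + 1) = pvPc ys (a, b)
        unfold pvPc
        simp only
        rw [pyGetD_cons_shift y ys a ha,
            show (b + 1 - 1 : Int) = (b - 1) + 1 by ring,
            pyGetD_cons_shift y ys (b-1) (by omega)]
      · have := ih y ys (fun i hi => h0 i (List.mem_cons_of_mem _ hi))
          (fun i hi => h1 i (List.mem_cons_of_mem _ hi))
        simpa using this

theorem bp_eq_pairs : ∀ (rest : List Int) (x : Int), pvBp (x :: rest) = pvPairs x x rest := by
  intro rest
  induction rest with
  | nil =>
    intro x
    simp [pvBp, pvCuts_eq, breaks_single, pvPairs, pvPc, PySem.List.pyGetD_zero_cons]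
  | cons y zs ih =>
    intro x
    -- the cut tail of (y :: zs), a nonempty list of indices ≥ 1
    obtain ⟨c0, ct, hc⟩ : ∃ c0 ct, pvBreaks (y :: zs) ++ [((y :: zs).length : Int)] = c0 :: ct := by
      cases hb : pvBreaks (y :: zs) with
      | nil => exact ⟨_, _, rfl⟩
      | cons b bs => exact ⟨b, bs ++ [((y :: zs).length : Int)], by simp⟩
    have hmem : ∀ i ∈ c0 :: ct, 1 ≤ i := by
      intro i hi
      rw [← hc] at hi
      rcases List.mem_append.mp hi with h | h
      · exact breaks_pos _ i h
      · simp only [List.mem_singleton] at h; subst h; simp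
    have hlen : ((x :: y :: zs).length : Int) = ((y :: zs).length : Int) + 1 := by
      simp only [List.length_cons]; push_cast; ring
    have hcutsY : pvCuts (y :: zs) = 0 :: c0 :: ct := by rw [pvCuts_eq, hc]
    by_cases h : y = x + 1
    · -- consecutive: cuts (x::y::zs) = 0 :: (c0::ct).map (+1)
      have hcutsX : pvCuts (x :: y :: zs) = 0 :: (c0 :: ct).map (· + 1) := by
        rw [pvCuts_eq, breaks_cons, if_pos h, List.nil_append, hlen, ← hc]
        simp
      have hshift := bp_shift (c0 :: ct) x (y :: zs)
        (fun i hi => le_trans (by norm_num) (hmem i hi))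
        (fun i hi => hmem i (List.mem_cons_of_mem _ hi))
      have hc0 : 1 ≤ c0 := hmem c0 (by simp)
      rw [pvPairs, if_pos h, pairs_setFirst zs x y, ← ih y]
      unfold pvBp
      rw [hcutsX, hcutsY]
      simp only [List.tail_cons, List.map_cons, List.zip_cons_cons, List.map_cons]
      simp only [List.map_cons, List.tail_cons] at hshift
      rw [hshift]
      unfold pvSetFirst pvPc
      simp only
      rw [show (c0 + 1 - 1 : Int) = (c0 - 1) + 1 by ring,
          pyGetD_cons_shift x (y :: zs) (c0 - 1) (by omega),
          PySem.List.pyGetD_zero_cons]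
    · -- break after x: cuts (x::y::zs) = 0 :: (pvCuts (y::zs)).map (+1)
      have hcutsX : pvCuts (x :: y :: zs) = 0 :: (pvCuts (y :: zs)).map (· + 1) := by
        rw [pvCuts_eq, breaks_cons, if_neg h, hlen, hcutsY, ← hc]
        simp
      have hshift := bp_shift (0 :: c0 :: ct) x (y :: zs)
        (by intro i hi
            rcases List.mem_cons.mp hi with h' | h'
            · omega
            · exact le_trans (by norm_num) (hmem i h'))
        (by intro i hi; exact hmem i hi)
      rw [pvPairs, if_neg h, ← ih y]
      unfold pvBp
      rw [hcutsX, hcutsY]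
      simp only [List.map_cons, List.tail_cons, List.zip_cons_cons] at hshift ⊢
      rw [hshift]
      unfold pvPc
      simp only
      rw [PySem.List.pyGetD_zero_cons, show (0 + 1 - 1 : Int) = 0 by ring,
          PySem.List.pyGetD_zero_cons]

-- ===== VERDICT (by name: the statement is the Claim_ definition above) =====
theorem format_episode_spec_py_spec : Claim_equal_format_episode_spec_py := by
  intro xs _
  unfold Spec_format_episode_spec_py
  cases xs with
  | nil => rfl
  | cons x rest =>
    have hslice : PySem.List.slice (x :: rest) (some 1) none = rest := by
      simp [PySem.List.slice]
    have hsliceC : PySem.List.slice (pvCuts (x :: rest)) (some 1) none = (pvCuts (x :: rest)).tail := by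
      have : (1 : Int) = ((1 : Nat) : Int) := rfl
      rw [this, PySem.List.slice_from_natCast, List.drop_one]
    rw [format_episode_spec_py, format_episode_spec_py_alt]
    simp only [hslice, hsliceC]
    rw [pvFoldA, List.nil_append]
    have : ((pvCuts (x :: rest)).zip (pvCuts (x :: rest)).tail).map
        (fun lh => pvFmt (PySem.List.pyGetD (x :: rest) lh.1 0)
                         (PySem.List.pyGetD (x :: rest) (lh.2 - 1) 0))
        = (pvBp (x :: rest)).map (fun ab => pvFmt ab.1 ab.2) := by
      rw [pvBp, List.map_map]; rfl
    rw [this, bp_eq_pairs]
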